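-- pv_equiv track=rewrite | github.com/jorqueraquentin-lang/MagicOptimizer | HostProject/Content/Python/magic_optimizer/entry.py | _tokenize_name
-- ===== SOURCE A (Python) =====
-- def _tokenize_name(name: str):
--     try:
--         base = (name or '').lower()
--         base = base.replace('.', '_')
--         tokens = []
--         for chunk in base.replace('-', '_').split('_'):
--             c = chunk.strip()
--             if not c:
--                 continue
--             tokens.append(c)
--         return tokens
--     except Exception:
--         return []
-- ===== SOURCE B (Python) =====
-- def _tokenize_name(name: str):
--     try:
--         tokens = []
--         buf = ''
--         for ch in (name or '').lower():
--             if ch in '.-_':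
--                 t = buf.strip()
--                 if t:
--                     tokens.append(t)
--                 buf = ''
--             else:
--                 buf += ch
--         t = buf.strip()
--         if t:
--             tokens.append(t)
--         return tokens
--     except Exception:
--         return []
-- ===== Notes on version B (the rewrite author's own statement) =====
-- stated objective: alternative
-- what changed: Replaces the replace/replace/split string pipeline with a single character-by-character scan that flushes a token buffer at each separator ('.', '-', '_'), stripping each token of surrounding whitespace on flush.
import Mathlib
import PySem

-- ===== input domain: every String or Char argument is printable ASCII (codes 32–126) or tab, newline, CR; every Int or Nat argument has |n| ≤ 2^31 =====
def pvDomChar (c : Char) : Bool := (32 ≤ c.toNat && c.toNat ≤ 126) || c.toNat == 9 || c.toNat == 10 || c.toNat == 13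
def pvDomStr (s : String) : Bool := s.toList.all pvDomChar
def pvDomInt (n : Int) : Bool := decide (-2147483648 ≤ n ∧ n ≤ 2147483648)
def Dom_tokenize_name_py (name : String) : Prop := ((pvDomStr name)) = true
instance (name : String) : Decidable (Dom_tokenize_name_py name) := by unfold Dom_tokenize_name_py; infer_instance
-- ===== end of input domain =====

-- B replaces A's replace/replace/split pipeline with a single character scan flushing a token buffer at separators (alternative decomposition, same cost).


-- ===== PORT A =====
-- `name or ''` equals `name` for strings (only '' is falsy); kept literal via the if.
-- split/strip are ported exactly through PySem.Chars (PySem.Str has no splitOn wrapper).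
def tokenize_name_py (name : String) : List String :=
  let base0 := if name == "" then "" else name
  let base1 := PySem.Str.lower base0
  let base2 := PySem.Str.replace base1 "." "_"
  let base3 := PySem.Str.replace base2 "-" "_"
  (PySem.Chars.splitOn base3.toList ['_']).foldl
    (fun tokens chunk =>
      let c := PySem.Chars.strip chunk
      if c.isEmpty then tokens else tokens ++ [String.ofList c]) []

-- ===== PORT B =====
-- flush: strip the buffer; append it if non-empty (the repeated `t = buf.strip(); if t: tokens.append(t)` code of Source B)
def pvFlush (tokens : List String) (buf : List Char) : List String :=
  let t := PySem.Chars.strip buf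
  if t.isEmpty then tokens else tokens ++ [String.ofList t]

def tokenize_name_py_alt (name : String) : List String :=
  let st := (PySem.Chars.lower name.toList).foldl
    (fun st c =>
      if c = '.' ∨ c = '-' ∨ c = '_' then (pvFlush st.1 st.2, ([] : List Char))
      else (st.1, st.2 ++ [c]))
    (([] : List String), ([] : List Char))
  pvFlush st.1 st.2

-- ===== PRECONDITION & SPEC =====
def Spec_tokenize_name_py (name : String) (out : List String) : Prop := out = tokenize_name_py_alt name
instance (name : String) (out : List String) : Decidable (Spec_tokenize_name_py name out) := by unfold Spec_tokenize_name_py; infer_instance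

-- ===== CLAIM (what is proved, stated in full; the proofs are below) =====
def Claim_equal_tokenize_name_py : Prop := ∀ (name : String), Dom_tokenize_name_py name → Spec_tokenize_name_py name (tokenize_name_py name)

-- ===== LEMMAS AND PROOFS =====

-- single-character replace is a map
theorem pv_replace_go_single (a b : Char) :
    ∀ (l : List Char) (fuel : Nat) (acc : List Char), l.length ≤ fuel →
      PySem.Chars.replace.go [a] [b] fuel l acc
        = acc.reverse ++ l.map (fun c => if c = a then b else c) := by
  intro l
  induction l with
  | nil =>
      intro fuel acc _
      cases fuel <;> simp [PySem.Chars.replace.go]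
  | cons c t ih =>
      intro fuel acc h
      cases fuel with
      | zero => simp at h
      | succ f =>
          by_cases hc : c = a
          · subst hc
            simp [PySem.Chars.replace.go, List.isPrefixOf,
              ih f (b :: acc) (by simpa using h)]
          · have hc' : ¬ a = c := fun hh => hc hh.symm
            simp [PySem.Chars.replace.go, List.isPrefixOf, hc, hc',
              ih f (c :: acc) (by simpa using h)]

theorem pv_replace_single (a b : Char) (l : List Char) :
    PySem.Chars.replace l [a] [b] = l.map (fun c => if c = a then b else c) := by
  simp [PySem.Chars.replace, pv_replace_go_single a b l l.length [] (le_refl _)]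

-- split on the single character '_'
def pvSplitU : List Char → List Char → List (List Char)
  | pre, [] => [pre]
  | pre, c :: t => if c = '_' then pre :: pvSplitU [] t else pvSplitU (pre ++ [c]) t

theorem pv_splitOn_go_u :
    ∀ (l : List Char) (fuel : Nat) (cur : List Char) (acc : List (List Char)), l.length < fuel →
      PySem.Chars.splitOn.go ['_'] fuel l cur acc = acc.reverse ++ pvSplitU cur.reverse l := by
  intro l
  induction l with
  | nil =>
      intro fuel cur acc h
      cases fuel with
      | zero => simp at h
      | succ f => simp [PySem.Chars.splitOn.go, pvSplitU]
  | cons c t ih =>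
      intro fuel cur acc h
      cases fuel with
      | zero => simp at h
      | succ f =>
          by_cases hc : c = '_'
          · subst hc
            simp [PySem.Chars.splitOn.go, List.isPrefixOf, pvSplitU,
              ih f [] (cur.reverse :: acc) (by simpa using h)]
          · have hc' : ¬ '_' = c := fun hh => hc hh.symm
            simp [PySem.Chars.splitOn.go, List.isPrefixOf, hc, hc', pvSplitU,
              ih f (c :: cur) acc (by simpa using h)]

theorem pv_splitOn_u (l : List Char) :
    PySem.Chars.splitOn l ['_'] = pvSplitU [] l := by
  simpa using pv_splitOn_go_u l (l.length + 1) [] [] (by omega)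

-- splitting the doubly-replaced list on '_' = splitting the original on any of '.', '-', '_'
def pvSplitS : List Char → List Char → List (List Char)
  | pre, [] => [pre]
  | pre, c :: t => if c = '.' ∨ c = '-' ∨ c = '_' then pre :: pvSplitS [] t else pvSplitS (pre ++ [c]) t

theorem pv_splitU_map (l : List Char) : ∀ pre,
    pvSplitU pre (l.map (fun c =>
        if (if c = '.' then '_' else c) = '-' then '_' else (if c = '.' then '_' else c)))
      = pvSplitS pre l := by
  induction l with
  | nil => intro pre; simp [pvSplitU, pvSplitS]
  | cons c t ih =>
      intro pre
      by_cases h1 : c = '.'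
      · simp [pvSplitU, pvSplitS, h1, ih]
      · by_cases h2 : c = '-'
        · simp [pvSplitU, pvSplitS, h2, ih]
        · by_cases h3 : c = '_'
          · simp [pvSplitU, pvSplitS, h3, ih]
          · simp [pvSplitU, pvSplitS, h1, h2, h3, ih]

-- the common token function both loops compute
def pvTokens : List Char → List Char → List String
  | buf, [] => pvFlush [] buf
  | buf, c :: t => if c = '.' ∨ c = '-' ∨ c = '_' then pvFlush [] buf ++ pvTokens [] t
                   else pvTokens (buf ++ [c]) t

theorem pv_flush_split (toks : List String) (buf : List Char) :
    pvFlush toks buf = toks ++ pvFlush [] buf := by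
  by_cases h : (PySem.Chars.strip buf).isEmpty <;> simp [pvFlush, h]

-- A's loop over the chunks of pvSplitS computes pvTokens
theorem pv_foldA (l : List Char) : ∀ (buf : List Char) (acc : List String),
    (pvSplitS buf l).foldl pvFlush acc = acc ++ pvTokens buf l := by
  induction l with
  | nil => intro buf acc; simp [pvSplitS, pvTokens, pv_flush_split acc buf]
  | cons c t ih =>
      intro buf acc
      by_cases h : c = '.' ∨ c = '-' ∨ c = '_'
      · simp [pvSplitS, pvTokens, h, ih, pv_flush_split acc buf]
      · simp [pvSplitS, pvTokens, h, ih]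

-- B's scan computes pvTokens
theorem pv_scanB (l : List Char) : ∀ (toks : List String) (buf : List Char),
    (let st := l.foldl
        (fun st c =>
          if c = '.' ∨ c = '-' ∨ c = '_' then (pvFlush st.1 st.2, ([] : List Char))
          else (st.1, st.2 ++ [c])) (toks, buf)
     pvFlush st.1 st.2) = toks ++ pvTokens buf l := by
  induction l with
  | nil => intro toks buf; simpa [pvTokens] using pv_flush_split toks buf
  | cons c t ih =>
      intro toks buf
      by_cases h : c = '.' ∨ c = '-' ∨ c = '_'
      · simp only [List.foldl_cons]
        rw [show (if c = '.' ∨ c = '-' ∨ c = '_' then (pvFlush toks buf, ([] : List Char))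
              else (toks, buf ++ [c])) = (pvFlush toks buf, ([] : List Char)) from if_pos h]
        simp only [pvTokens, if_pos h]
        rw [ih (pvFlush toks buf) [], pv_flush_split toks buf, List.append_assoc]
      · simp only [List.foldl_cons]
        rw [show (if c = '.' ∨ c = '-' ∨ c = '_' then (pvFlush toks buf, ([] : List Char))
              else (toks, buf ++ [c])) = (toks, buf ++ [c]) from if_neg h]
        simp only [pvTokens, if_neg h]
        exact ih toks (buf ++ [c])

-- ===== VERDICT (by name: the statement is the Claim_ definition above) =====
theorem tokenize_name_py_spec : Claim_equal_tokenize_name_py := by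
  intro name _
  unfold Spec_tokenize_name_py tokenize_name_py tokenize_name_py_alt
  have hbase : (if name == "" then "" else name) = name := by
    by_cases h : name = "" <;> simp [h]
  have hd : (".".toList) = ['.'] := rfl
  have hh : ("-".toList) = ['-'] := rfl
  have hu : ("_".toList) = ['_'] := rfl
  rw [hbase]
  simp only [PySem.Str.replace, PySem.Str.lower, String.toList_ofList, hd, hh, hu]
  rw [pv_replace_single, pv_replace_single, List.map_map, Function.comp_def,
    pv_splitOn_u, pv_splitU_map]
  exact (pv_foldA (PySem.Chars.lower name.toList) [] []).trans
    (pv_scanB (PySem.Chars.lower name.toList) [] []).symm
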